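-- pv_equiv track=rewrite | github.com/sorrowless/ansible_controller | tools/auto-format.py | format_white_space_in_end
-- ===== SOURCE A (Python) =====
-- def format_white_space_in_end(file_content: list) -> list:
--     result = file_content
--     i = len(result) - 1
--     while i > 0:
--         if result[i] != "":
--             break
--         del result[i]
--         i -= 1
--     result.append("")
--     return result
-- ===== SOURCE B (Python) =====
-- def format_white_space_in_end(file_content: list) -> list:
--     last = 0
--     for i, line in enumerate(file_content):
--         if line != "":
--             last = i
--     file_content[last + 1:] = [""]
--     return file_content
-- ===== Notes on version B (the rewrite author's own statement) =====
-- stated objective: alternative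
-- what changed: Replaced A's backward while-loop that deletes trailing empty lines one at a time with a single forward scan that records the last non-empty index and then replaces the tail with one slice assignment.
import Mathlib
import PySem

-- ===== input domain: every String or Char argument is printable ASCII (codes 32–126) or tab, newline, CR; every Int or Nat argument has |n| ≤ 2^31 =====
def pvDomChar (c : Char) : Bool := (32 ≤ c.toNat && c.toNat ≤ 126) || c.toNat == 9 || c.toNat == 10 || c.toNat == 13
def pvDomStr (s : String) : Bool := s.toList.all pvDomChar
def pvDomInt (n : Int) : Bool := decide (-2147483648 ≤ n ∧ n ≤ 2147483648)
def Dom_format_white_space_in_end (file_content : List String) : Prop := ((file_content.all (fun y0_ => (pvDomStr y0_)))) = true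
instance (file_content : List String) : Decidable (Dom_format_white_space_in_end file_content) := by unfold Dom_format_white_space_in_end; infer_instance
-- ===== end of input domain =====

-- B rebuilds the same return value with a forward scan + one tail replacement instead of A's
-- backward delete loop; equivalence is about the RETURN value only (both Pythons mutate the
-- argument in place, A by del/append, B by slice assignment).

-- ===== PORT A =====
-- A's while loop: i counts down from len-1; break on a non-empty line, else delete index i.
-- The loop invariant i = len(result)-1 keeps result[i] in range, so pyGetD's default is never used.
def pvALoop (result : List String) (i : Int) : List String :=
  if _h : 0 < i then
    if PySem.List.pyGetD result i "" ≠ "" then result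
    else pvALoop (result.eraseIdx i.toNat) (i - 1)
  else result
termination_by i.toNat
decreasing_by omega

def format_white_space_in_end (file_content : List String) : List String :=
  let result := file_content
  (pvALoop result ((result.length : Int) - 1)) ++ [""]

-- ===== PORT B =====
-- last = greatest index holding a non-empty line (0 if none)
def pvBLast (file_content : List String) : Int :=
  (PySem.List.enumerate file_content 0).foldl
    (fun last p => if p.2 ≠ "" then p.1 else last) 0

-- file_content[last+1:] = [""]  (tail replacement), then return file_content
def format_white_space_in_end_alt (file_content : List String) : List String :=
  file_content.take (pvBLast file_content + 1).toNat ++ [""]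

-- ===== PRECONDITION & SPEC =====
def Spec_format_white_space_in_end (file_content : List String) (out : List String) : Prop := out = format_white_space_in_end_alt file_content
instance (file_content : List String) (out : List String) : Decidable (Spec_format_white_space_in_end file_content out) := by unfold Spec_format_white_space_in_end; infer_instance

-- ===== CLAIM (what is proved, stated in full; the proofs are below) =====
def Claim_equal_format_white_space_in_end : Prop := ∀ (file_content : List String), Dom_format_white_space_in_end file_content → Spec_format_white_space_in_end file_content (format_white_space_in_end file_content)

-- ===== LEMMAS AND PROOFS =====

theorem pvEnumerate_append_singleton (xs : List String) (x : String) (s : Int) :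
    PySem.List.enumerate (xs ++ [x]) s
      = PySem.List.enumerate xs s ++ [((s + xs.length : Int), x)] := by
  induction xs generalizing s with
  | nil => simp [PySem.List.enumerate_cons, PySem.List.enumerate_nil]
  | cons a t ih =>
      simp [PySem.List.enumerate_cons, ih]
      ring_nf

theorem pvBLast_append (xs : List String) (x : String) :
    pvBLast (xs ++ [x]) = if x ≠ "" then (xs.length : Int) else pvBLast xs := by
  unfold pvBLast
  rw [pvEnumerate_append_singleton]
  simp

theorem pvBLast_bound (l : List String) (h : l ≠ []) :
    0 ≤ pvBLast l ∧ pvBLast l < l.length := by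
  induction l using List.reverseRecOn with
  | nil => simp at h
  | append_singleton xs x ih =>
      rw [pvBLast_append]
      by_cases hx : x = ""
      · simp [hx]
        rcases List.eq_nil_or_concat' xs with h0 | _
        · subst h0
          simp [pvBLast, PySem.List.enumerate_nil]
        · have := ih (by rintro rfl; simp_all)
          simp at this ⊢
          omega
      · simp [hx]

theorem pvALoop_append_ne (xs : List String) (x : String) (hxs : xs ≠ []) (hx : x ≠ "") :
    pvALoop (xs ++ [x]) ((xs.length : Int)) = xs ++ [x] := by
  rw [pvALoop]
  have hlen : 0 < xs.length := List.length_pos_iff.mpr hxs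
  have h0 : (0 : Int) < xs.length := by exact_mod_cast hlen
  rw [dif_pos h0]
  have hget : PySem.List.pyGetD (xs ++ [x]) ((xs.length : Int)) "" = x := by
    simp [PySem.List.pyGetD_natCast, List.getD]
  rw [if_pos (by simp [hget, hx])]

theorem pvALoop_append_empty (xs : List String) (hxs : xs ≠ []) :
    pvALoop (xs ++ [""]) ((xs.length : Int)) = pvALoop xs ((xs.length : Int) - 1) := by
  rw [pvALoop]
  have hlen : 0 < xs.length := List.length_pos_iff.mpr hxs
  have h0 : (0 : Int) < xs.length := by exact_mod_cast hlen
  rw [dif_pos h0]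
  have hget : PySem.List.pyGetD (xs ++ [""]) ((xs.length : Int)) "" = "" := by
    simp [PySem.List.pyGetD_natCast, List.getD]
  rw [if_neg (by simp [hget])]
  congr 1
  have : ((xs.length : Int)).toNat = xs.length := by omega
  rw [this, List.eraseIdx_append_of_length_le (le_refl _)]
  simp

theorem pv_main (l : List String) :
    pvALoop l ((l.length : Int) - 1) ++ [""] = l.take (pvBLast l + 1).toNat ++ [""] := by
  induction l using List.reverseRecOn with
  | nil => simp [pvALoop, pvBLast, PySem.List.enumerate_nil]
  | append_singleton xs x ih =>
      have hidx : ((xs ++ [x]).length : Int) - 1 = (xs.length : Int) := by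
        simp
      rw [hidx]
      rcases List.eq_nil_or_concat' xs with h0 | _
      · subst h0
        simp only [List.nil_append, List.length_nil, Int.natCast_zero]
        by_cases hx : x = ""
        · subst hx
          simp [pvALoop, pvBLast, PySem.List.enumerate_cons, PySem.List.enumerate_nil]
        · simp [pvALoop, pvBLast, PySem.List.enumerate_cons, PySem.List.enumerate_nil, hx]
      · have hxs : xs ≠ [] := by rintro rfl; simp_all
        by_cases hx : x = ""
        · subst hx
          rw [pvALoop_append_empty xs hxs]
          have hbnd := pvBLast_bound xs hxs
          have hB : (xs ++ [""]).take (pvBLast (xs ++ [""]) + 1).toNat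
              = xs.take (pvBLast xs + 1).toNat := by
            rw [pvBLast_append]
            simp only [ne_eq, not_true_eq_false, if_false]
            have hle : (pvBLast xs + 1).toNat ≤ xs.length := by omega
            rw [List.take_append_of_le_length hle]
          rw [hB]
          exact ih
        · rw [pvALoop_append_ne xs x hxs hx]
          have hB : (xs ++ [x]).take (pvBLast (xs ++ [x]) + 1).toNat = xs ++ [x] := by
            rw [pvBLast_append]
            simp only [ne_eq, hx, not_false_iff, if_true]
            have h1 : ((xs.length : Int) + 1).toNat = (xs ++ [x]).length := by
              simp
            rw [h1, List.take_length]
          rw [hB]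

-- ===== VERDICT (by name: the statement is the Claim_ definition above) =====
theorem format_white_space_in_end_spec : Claim_equal_format_white_space_in_end := by
  unfold Claim_equal_format_white_space_in_end
  intro l _
  unfold Spec_format_white_space_in_end format_white_space_in_end format_white_space_in_end_alt
  exact pv_main l
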